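-- pv_equiv track=rewrite | github.com/LiDeChi/crawl_games | dynamic_crawler.py | get_resource_type
-- ===== SOURCE A (Python) =====
-- def get_resource_type(url, content_type=''):
--     """根据URL和内容类型确定资源类型"""
--     url_lower = url.lower()
--     content_type_lower = content_type.lower()
--
--     # 图片文件
--     if any(ext in url_lower for ext in ['.jpg', '.jpeg', '.png', '.gif', '.webp', '.svg', '.ico']) or 'image' in content_type_lower:
--         return 'images'
--     # 音频文件
--     elif any(ext in url_lower for ext in ['.mp3', '.wav', '.ogg', '.m4a']) or 'audio' in content_type_lower:
--         return 'audio'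
--     # 视频文件
--     elif any(ext in url_lower for ext in ['.mp4', '.webm', '.mkv', '.flv', '.m3u8']) or 'video' in content_type_lower:
--         return 'video'
--     # 脚本文件
--     elif any(ext in url_lower for ext in ['.js', '.jsx', '.ts', '.tsx']) or 'javascript' in content_type_lower:
--         return 'scripts'
--     # 文档文件
--     elif any(ext in url_lower for ext in ['.pdf', '.doc', '.docx', '.xls', '.xlsx', '.txt']):
--         return 'documents'
--     # 其他文件
--     else:
--         return 'others'
-- ===== SOURCE B (Python) =====
-- # B: first-character index + positional sweep with a min-priority accumulator,
-- # instead of A's per-category substring chain: patterns are bucketed by their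
-- # first character once, each start position does one bucket lookup and tries
-- # only the patterns that can begin there, and the smallest matched priority
-- # selects the answer from a table.
--
-- _CATS = ['images', 'audio', 'video', 'scripts', 'documents', 'others']
--
-- _URL_PATS = (
--     [(e, 0) for e in ['.jpg', '.jpeg', '.png', '.gif', '.webp', '.svg', '.ico']]
--     + [(e, 1) for e in ['.mp3', '.wav', '.ogg', '.m4a']]
--     + [(e, 2) for e in ['.mp4', '.webm', '.mkv', '.flv', '.m3u8']]
--     + [(e, 3) for e in ['.js', '.jsx', '.ts', '.tsx']]
--     + [(e, 4) for e in ['.pdf', '.doc', '.docx', '.xls', '.xlsx', '.txt']]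
-- )
--
-- _CT_PATS = [('image', 0), ('audio', 1), ('video', 2), ('javascript', 3)]
--
--
-- def _index(pats):
--     """Bucket the (pattern, priority) pairs by their first character."""
--     idx = {}
--     for pat, prio in pats:
--         idx[pat[0]] = idx.get(pat[0], []) + [(pat, prio)]
--     return idx
--
--
-- _URL_IDX = _index(_URL_PATS)
-- _CT_IDX = _index(_CT_PATS)
--
-- _EMPTY = []
--
--
-- def _scan(s, idx, best):
--     """Sweep every start position of s; at each, try only the patterns whose
--     bucket matches the character there, folding a min over their priorities."""
--     for i, ch in enumerate(s):
--         for pat, prio in idx.get(ch, _EMPTY):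
--             if s.startswith(pat, i):
--                 best = min(best, prio)
--     return best
--
--
-- def get_resource_type(url, content_type=''):
--     best = _scan(url.lower(), _URL_IDX, 5)
--     best = _scan(content_type.lower(), _CT_IDX, best)
--     return _CATS[best]
-- ===== Notes on version B (the rewrite author's own statement) =====
-- stated objective: alternative
-- what changed: Replaces A's per-category if/elif substring chain with a first-character bucket index over all extension/keyword patterns plus a single positional sweep of the lowercased url and content type that folds a min-priority accumulator, the answer being a table lookup by the smallest matched priority.
import Mathlib
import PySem

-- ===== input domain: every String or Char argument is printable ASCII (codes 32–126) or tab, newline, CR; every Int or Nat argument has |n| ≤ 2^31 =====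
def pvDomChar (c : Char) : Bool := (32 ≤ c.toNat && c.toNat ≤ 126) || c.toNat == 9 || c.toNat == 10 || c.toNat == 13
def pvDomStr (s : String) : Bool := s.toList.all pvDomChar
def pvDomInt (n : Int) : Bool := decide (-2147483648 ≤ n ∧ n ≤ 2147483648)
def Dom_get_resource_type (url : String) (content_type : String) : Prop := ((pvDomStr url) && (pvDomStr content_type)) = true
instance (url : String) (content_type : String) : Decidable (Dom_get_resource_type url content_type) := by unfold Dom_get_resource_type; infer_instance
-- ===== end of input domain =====

-- B replaces A's per-category substring chain by a first-character pattern index and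
-- one positional sweep with a min-priority accumulator plus a final table lookup
-- (alternative algorithm; not claimed faster).

-- ===== PORT A =====
def get_resource_type (url : String) (content_type : String) : String :=
  let url_lower := PySem.Str.lower url
  let content_type_lower := PySem.Str.lower content_type
  if ([".jpg", ".jpeg", ".png", ".gif", ".webp", ".svg", ".ico"].any
        (fun ext => PySem.Str.isIn ext url_lower)) || PySem.Str.isIn "image" content_type_lower then
    "images"
  else if ([".mp3", ".wav", ".ogg", ".m4a"].any
        (fun ext => PySem.Str.isIn ext url_lower)) || PySem.Str.isIn "audio" content_type_lower then
    "audio"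
  else if ([".mp4", ".webm", ".mkv", ".flv", ".m3u8"].any
        (fun ext => PySem.Str.isIn ext url_lower)) || PySem.Str.isIn "video" content_type_lower then
    "video"
  else if ([".js", ".jsx", ".ts", ".tsx"].any
        (fun ext => PySem.Str.isIn ext url_lower)) || PySem.Str.isIn "javascript" content_type_lower then
    "scripts"
  else if ([".pdf", ".doc", ".docx", ".xls", ".xlsx", ".txt"].any
        (fun ext => PySem.Str.isIn ext url_lower)) then
    "documents"
  else
    "others"

-- ===== PORT B =====
-- the priority table _CATS / _URL_PATS / _CT_PATS from Source B
def pvCats : List String := ["images", "audio", "video", "scripts", "documents", "others"]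

def pvUrlPats : List (List Char × Nat) :=
  [".jpg", ".jpeg", ".png", ".gif", ".webp", ".svg", ".ico"].map (fun e => (e.toList, 0))
  ++ [".mp3", ".wav", ".ogg", ".m4a"].map (fun e => (e.toList, 1))
  ++ [".mp4", ".webm", ".mkv", ".flv", ".m3u8"].map (fun e => (e.toList, 2))
  ++ [".js", ".jsx", ".ts", ".tsx"].map (fun e => (e.toList, 3))
  ++ [".pdf", ".doc", ".docx", ".xls", ".xlsx", ".txt"].map (fun e => (e.toList, 4))

def pvCtPats : List (List Char × Nat) :=
  [("image".toList, 0), ("audio".toList, 1), ("video".toList, 2), ("javascript".toList, 3)]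

-- _index: bucket the (pattern, priority) pairs by first character
-- (pat[0]: `headD` is exact here, every pattern in the two tables is nonempty)
def pvIndex (pats : List (List Char × Nat)) : PySem.Dict Char (List (List Char × Nat)) :=
  pats.foldl
    (fun d pk => d.insert (pk.1.headD ' ') (d.getD (pk.1.headD ' ') [] ++ [pk]))
    PySem.Dict.empty

def pvUrlIdx : PySem.Dict Char (List (List Char × Nat)) := pvIndex pvUrlPats
def pvCtIdx : PySem.Dict Char (List (List Char × Nat)) := pvIndex pvCtPats

-- _scan: the positional sweep; at each position only the bucket of the head character is tried
def pvScan (idx : PySem.Dict Char (List (List Char × Nat))) : List Char → Nat → Nat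
  | [], best => best
  | c :: rest, best =>
      pvScan idx rest
        ((idx.getD c []).foldl
          (fun b pk => if PySem.Chars.startswith (c :: rest) pk.1 then min b pk.2 else b) best)

def get_resource_type_alt (url : String) (content_type : String) : String :=
  let b1 := pvScan pvUrlIdx (PySem.Str.lower url).toList 5
  let b2 := pvScan pvCtIdx (PySem.Str.lower content_type).toList b1
  pvCats.getD b2 "others"   -- _CATS[best]; best ≤ 5 always, the default is never used

-- ===== PRECONDITION & SPEC =====
def Spec_get_resource_type (url : String) (content_type : String) (out : String) : Prop := out = get_resource_type_alt url content_type
instance (url : String) (content_type : String) (out : String) : Decidable (Spec_get_resource_type url content_type out) := by unfold Spec_get_resource_type; infer_instance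

-- ===== CLAIM =====
def Claim_equal_get_resource_type : Prop := ∀ (url : String) (content_type : String), Dom_get_resource_type url content_type → Spec_get_resource_type url content_type (get_resource_type url content_type)

-- ===== LEMMAS AND PROOFS =====

-- the "isIn"-characterisation of one position-sweep step, as a fold over the same pattern list
def pvInFold (pats : List (List Char × Nat)) (s : List Char) (acc : Nat) : Nat :=
  pats.foldl (fun b pk => if PySem.Chars.isIn pk.1 s then min b pk.2 else b) acc

-- membership in c :: rest splits into a match at the head position plus membership in rest
theorem pv_isIn_cons (p : List Char) (c : Char) (rest : List Char) :
    PySem.Chars.isIn p (c :: rest)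
      = (PySem.Chars.startswith (c :: rest) p || PySem.Chars.isIn p rest) := by
  rw [Bool.eq_iff_iff]
  simp [PySem.Chars.isIn_iff_infix, PySem.Chars.startswith_iff, List.infix_cons_iff]

-- a nonempty pattern never occurs in the empty string
theorem pv_isIn_nil (p : List Char) (h : p ≠ []) : PySem.Chars.isIn p [] = false := by
  simp [PySem.Chars.isIn_eq_false_iff, List.infix_nil, h]

-- a conditional-min fold lets a 'min a' factor out of the accumulator
theorem pv_fold_min (f : List Char × Nat → Bool) (L : List (List Char × Nat)) (a : Nat) :
    ∀ x : Nat, L.foldl (fun b pk => if f pk then min b pk.2 else b) (min a x)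
      = min a (L.foldl (fun b pk => if f pk then min b pk.2 else b) x) := by
  induction L with
  | nil => intro x; rfl
  | cons pk ps ih =>
    intro x
    by_cases h : f pk = true
    · simp only [List.foldl_cons, h, if_pos]
      rw [Nat.min_assoc, ih]
    · simp only [List.foldl_cons, h, if_neg, Bool.not_eq_true] at *
      simp [ih]

-- one cons-step of the sweep merges into the isIn-fold
theorem pv_merge_cons (c : Char) (rest : List Char) (L : List (List Char × Nat)) :
    ∀ acc : Nat, pvInFold L (c :: rest) acc
      = pvInFold L rest
          (L.foldl (fun b pk => if PySem.Chars.startswith (c :: rest) pk.1 then min b pk.2 else b) acc) := by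
  induction L with
  | nil => intro acc; rfl
  | cons pk ps ih =>
    intro acc
    simp only [pvInFold, List.foldl_cons] at *
    rw [ih]
    have hcomm : ∀ (y : Nat), (if PySem.Chars.isIn pk.1 rest then
          min (ps.foldl (fun b pk => if PySem.Chars.startswith (c :: rest) pk.1 then min b pk.2 else b) y) pk.2
        else ps.foldl (fun b pk => if PySem.Chars.startswith (c :: rest) pk.1 then min b pk.2 else b) y)
        = ps.foldl (fun b pk => if PySem.Chars.startswith (c :: rest) pk.1 then min b pk.2 else b)
            (if PySem.Chars.isIn pk.1 rest then min y pk.2 else y) := by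
      intro y
      by_cases h : PySem.Chars.isIn pk.1 rest = true
      · simp only [h, if_pos]
        rw [Nat.min_comm y pk.2, pv_fold_min, Nat.min_comm]
      · simp [h]
    rw [hcomm]
    congr 1
    congr 1
    rw [pv_isIn_cons]
    by_cases h1 : PySem.Chars.startswith (c :: rest) pk.1 = true <;>
      by_cases h2 : PySem.Chars.isIn pk.1 rest = true <;> simp [h1, h2]

-- main characterisation: the sweep computes the isIn-fold (patterns must be nonempty)
theorem pv_fold_nil_id (pats : List (List Char × Nat)) (hne : ∀ pk ∈ pats, pk.1 ≠ []) :
    ∀ acc : Nat, pvInFold pats [] acc = acc := by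
  induction pats with
  | nil => intro acc; rfl
  | cons pk ps ih =>
    intro acc
    simp only [pvInFold, List.foldl_cons,
      pv_isIn_nil pk.1 (hne pk (List.mem_cons_self)), if_neg, Bool.false_eq_true,
      not_false_eq_true]
    exact ih (fun q hq => hne q (List.mem_cons_of_mem _ hq)) acc

-- a pattern starting with the wrong character never matches at the head position
theorem pv_sw_head (c : Char) (rest : List Char) (h : Char) (tl : List Char) (hne : h ≠ c) :
    PySem.Chars.startswith (c :: rest) (h :: tl) = false := by
  rw [← Bool.not_eq_true, PySem.Chars.startswith_iff]
  intro hpre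
  exact hne (List.cons_prefix_cons.mp hpre).1


-- restricting the sweep step to the bucket of the head character loses nothing
theorem pv_fold_filter (c : Char) (rest : List Char) (L : List (List Char × Nat))
    (hne : ∀ pk ∈ L, pk.1 ≠ []) :
    ∀ acc : Nat,
      (L.filter (fun pk => pk.1.head? == some c)).foldl
          (fun b pk => if PySem.Chars.startswith (c :: rest) pk.1 then min b pk.2 else b) acc
        = L.foldl
            (fun b pk => if PySem.Chars.startswith (c :: rest) pk.1 then min b pk.2 else b) acc := by
  induction L with
  | nil => intro acc; rfl
  | cons pk ps ih =>
    intro acc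
    have hps : ∀ q ∈ ps, q.1 ≠ [] := fun q hq => hne q (List.mem_cons_of_mem _ hq)
    rcases hp : pk.1 with _ | ⟨h, tl⟩
    · exact absurd hp (hne pk List.mem_cons_self)
    · by_cases hc : h = c
      · subst hc
        simp only [List.filter_cons, hp, List.head?_cons, beq_self_eq_true, if_pos,
          List.foldl_cons, ih hps]
      · simp only [List.filter_cons, hp, List.head?_cons, List.foldl_cons,
          pv_sw_head c rest h tl hc, Bool.false_eq_true, if_neg, not_false_eq_true,
          Option.some_beq_some]
        rw [if_neg (by simpa using hc)]
        exact ih hps acc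

-- the two concrete first-character indexes bucket exactly by head character
set_option maxRecDepth 4000 in
theorem pv_url_idx_eq (c : Char) :
    PySem.Dict.getD pvUrlIdx c [] = pvUrlPats.filter (fun pk => pk.1.head? == some c) := by
  by_cases hc : c = '.'
  · subst hc; decide
  · have hall : ∀ pk ∈ pvUrlPats, pk.1.head? = some '.' := by decide
    have hd : pvUrlIdx = PySem.Dict.mk [('.', pvUrlPats)] := by decide
    rw [hd]
    have hfil : pvUrlPats.filter (fun pk => pk.1.head? == some c) = [] := by
      refine List.filter_eq_nil_iff.mpr ?_
      intro pk hpk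
      rw [hall pk hpk]
      simp [beq_iff_eq]
      exact fun h => hc h.symm
    rw [hfil]
    simp [PySem.Dict.getD, PySem.Dict.get?, beq_iff_eq, Ne.symm hc]

set_option maxRecDepth 4000 in
theorem pv_ct_idx_eq (c : Char) :
    PySem.Dict.getD pvCtIdx c [] = pvCtPats.filter (fun pk => pk.1.head? == some c) := by
  by_cases h1 : c = 'i'
  · subst h1; decide
  by_cases h2 : c = 'a'
  · subst h2; decide
  by_cases h3 : c = 'v'
  · subst h3; decide
  by_cases h4 : c = 'j'
  · subst h4; decide
  have hall : ∀ pk ∈ pvCtPats,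
      pk.1.head? = some 'i' ∨ pk.1.head? = some 'a' ∨ pk.1.head? = some 'v' ∨
        pk.1.head? = some 'j' := by decide
  have hd : pvCtIdx = PySem.Dict.mk
      [('i', [("image".toList, 0)]), ('a', [("audio".toList, 1)]),
       ('v', [("video".toList, 2)]), ('j', [("javascript".toList, 3)])] := by decide
  rw [hd]
  have hfil : pvCtPats.filter (fun pk => pk.1.head? == some c) = [] := by
    refine List.filter_eq_nil_iff.mpr ?_
    intro pk hpk
    rcases hall pk hpk with h | h | h | h <;> rw [h] <;> simp [beq_iff_eq] <;>
      first
      | exact fun h => h1 h.symm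
      | exact fun h => h2 h.symm
      | exact fun h => h3 h.symm
      | exact fun h => h4 h.symm
  rw [hfil]
  simp [PySem.Dict.getD, PySem.Dict.get?, beq_iff_eq, Ne.symm h1, Ne.symm h2, Ne.symm h3,
    Ne.symm h4]

theorem pv_scan_eq (pats : List (List Char × Nat)) (idx : PySem.Dict Char (List (List Char × Nat)))
    (hne : ∀ pk ∈ pats, pk.1 ≠ [])
    (hidx : ∀ c, PySem.Dict.getD idx c [] = pats.filter (fun pk => pk.1.head? == some c)) :
    ∀ (s : List Char) (acc : Nat), pvScan idx s acc = pvInFold pats s acc := by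
  intro s
  induction s with
  | nil => intro acc; rw [pvScan, pv_fold_nil_id pats hne]
  | cons c rest ih =>
    intro acc
    rw [pvScan, ih, hidx c, pv_fold_filter c rest pats hne, ← pv_merge_cons]

-- a same-priority block of the isIn-fold is an 'any' test
theorem pv_block (v : Nat) (s : List Char) (exts : List String) :
    ∀ (x : Nat),
      (exts.map (fun e => (e.toList, v))).foldl
          (fun b pk => if PySem.Chars.isIn pk.1 s then min b pk.2 else b) x
        = if exts.any (fun e => PySem.Chars.isIn e.toList s) then min x v else x := by
  induction exts with
  | nil => intro x; rfl
  | cons e es ih =>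
    intro x
    by_cases h : PySem.Chars.isIn e.toList s = true
    · simp [h, ih]
    · simp [h, ih]

-- ===== VERDICT =====
theorem get_resource_type_spec : Claim_equal_get_resource_type := by
  intro url content_type _
  unfold Spec_get_resource_type
  simp only [get_resource_type, get_resource_type_alt]
  rw [pv_scan_eq pvUrlPats pvUrlIdx (by decide) pv_url_idx_eq,
    pv_scan_eq pvCtPats pvCtIdx (by decide) pv_ct_idx_eq]
  simp only [pvInFold, pvUrlPats, pvCtPats, List.foldl_append, pv_block,
    List.foldl_cons, List.foldl_nil, PySem.Str.isIn_eq, PySem.Str.toList_lower]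
  generalize ([".jpg", ".jpeg", ".png", ".gif", ".webp", ".svg", ".ico"].any fun e =>
      PySem.Chars.isIn e.toList (PySem.Chars.lower url.toList)) = a0
  generalize ([".mp3", ".wav", ".ogg", ".m4a"].any fun e =>
      PySem.Chars.isIn e.toList (PySem.Chars.lower url.toList)) = a1
  generalize ([".mp4", ".webm", ".mkv", ".flv", ".m3u8"].any fun e =>
      PySem.Chars.isIn e.toList (PySem.Chars.lower url.toList)) = a2
  generalize ([".js", ".jsx", ".ts", ".tsx"].any fun e =>
      PySem.Chars.isIn e.toList (PySem.Chars.lower url.toList)) = a3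
  generalize ([".pdf", ".doc", ".docx", ".xls", ".xlsx", ".txt"].any fun e =>
      PySem.Chars.isIn e.toList (PySem.Chars.lower url.toList)) = a4
  generalize PySem.Chars.isIn "image".toList (PySem.Chars.lower content_type.toList) = k0
  generalize PySem.Chars.isIn "audio".toList (PySem.Chars.lower content_type.toList) = k1
  generalize PySem.Chars.isIn "video".toList (PySem.Chars.lower content_type.toList) = k2
  generalize PySem.Chars.isIn "javascript".toList (PySem.Chars.lower content_type.toList) = k3
  revert a0 a1 a2 a3 a4 k0 k1 k2 k3
  decide
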